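-- pv_equiv track=rewrite | github.com/ICe-and-Pi-C/Bot | math_newCode.py | TaskToken
-- ===== SOURCE A (Python) =====
-- def TaskToken(taskString, startIndex, separator):
--     for i in range(startIndex, len(taskString)):
--         if taskString[i] == '"' and separator != '"':
--             return TaskToken(taskString, i+1, '"')
--         elif taskString[i] == separator:
--             if i - startIndex == 0:
--                 return TaskToken(taskString, i+1, ' ')
--             return [startIndex, i]
-- ===== SOURCE B (Python) =====
-- def TaskToken(taskString, startIndex, separator):
--     i = startIndex
--     n = len(taskString)
--     while i < n:
--         c = taskString[i]
--         if c == '"' and separator != '"':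
--             separator = '"'
--             startIndex = i + 1
--         elif c == separator:
--             if i == startIndex:
--                 separator = ' '
--                 startIndex = i + 1
--             else:
--                 return [startIndex, i]
--         i += 1
--     return None
-- ===== Notes on version B (the rewrite author's own statement) =====
-- stated objective: simpler
-- what changed: A's tail recursion (restarting a fresh for-loop on every quote/leading-separator event) is replaced by one iterative while-loop over a single advancing index with mutable startIndex/separator state and no recursion.
import Mathlib
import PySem

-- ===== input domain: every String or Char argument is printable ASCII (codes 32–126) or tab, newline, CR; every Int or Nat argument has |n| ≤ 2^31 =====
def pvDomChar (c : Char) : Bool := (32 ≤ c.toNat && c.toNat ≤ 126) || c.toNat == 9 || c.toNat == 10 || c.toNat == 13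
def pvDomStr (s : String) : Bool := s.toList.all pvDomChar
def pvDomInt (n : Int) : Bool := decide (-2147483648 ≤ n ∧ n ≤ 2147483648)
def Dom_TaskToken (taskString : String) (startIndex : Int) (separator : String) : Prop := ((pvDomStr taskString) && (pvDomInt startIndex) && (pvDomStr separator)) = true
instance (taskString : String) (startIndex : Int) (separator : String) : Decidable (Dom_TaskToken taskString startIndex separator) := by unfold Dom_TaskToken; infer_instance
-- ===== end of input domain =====

-- B replaces A's tail recursion + inner for-loop by one iterative single pass with mutable
-- startIndex/separator (objective: simpler, same O(n) cost).


-- ===== PORT A =====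
-- the body of A's for-loop over range(startIndex, len): Sum.inl (i+1, sep') means
-- "return TaskToken(taskString, i+1, sep')" (the tail-recursive call), Sum.inr r means "return r"
-- (falling off the loop is Sum.inr none); taskString[i] is pyGet? (none = IndexError, outside Pre_).
def ttScanA (cs : List Char) (start : Int) (sep : String) : List Int → (Int × String) ⊕ Option (List Int)
  | [] => Sum.inr none
  | i :: rest =>
    match PySem.List.pyGet? cs i with
    | none => Sum.inr none
    | some c =>
      if String.ofList [c] = "\"" ∧ sep ≠ "\"" then Sum.inl (i + 1, "\"")
      else if String.ofList [c] = sep then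
        if i - start = 0 then Sum.inl (i + 1, " ") else Sum.inr (some [start, i])
      else ttScanA cs start sep rest

-- termination lemma for A's tail recursion: a recursive call strictly advances startIndex and stays ≤ len
theorem ttScanA_inl_bounds (cs : List Char) (start : Int) (sep : String) (lo hi : Int)
    (l : List Int) (hmem : ∀ i ∈ l, lo ≤ i ∧ i < hi) (hlo : start ≤ lo)
    (ns : Int) (nsep : String) (h : ttScanA cs start sep l = Sum.inl (ns, nsep)) :
    start < ns ∧ ns ≤ hi := by
  induction l with
  | nil => simp [ttScanA] at h
  | cons i rest ih =>
    have hi' := hmem i (by simp)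
    cases hg : PySem.List.pyGet? cs i with
    | none => simp only [ttScanA, hg] at h; simp at h
    | some c =>
      simp only [ttScanA, hg] at h
      split_ifs at h
      · simp only [Sum.inl.injEq, Prod.mk.injEq] at h; omega
      · simp only [Sum.inl.injEq, Prod.mk.injEq] at h; omega
      · exact ih (fun j hj => hmem j (by simp [hj])) h

def TaskToken (taskString : String) (startIndex : Int) (separator : String) : Option (List Int) :=
  match h : ttScanA taskString.toList startIndex separator
      (PySem.List.pyRange startIndex (taskString.toList.length : Int) 1) with
  | Sum.inl (ns, nsep) => TaskToken taskString ns nsep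
  | Sum.inr r => r
termination_by ((taskString.toList.length : Int) - startIndex).toNat
decreasing_by
  have hb := ttScanA_inl_bounds taskString.toList startIndex separator startIndex
      (taskString.toList.length : Int) _
      (fun i hi => (PySem.List.mem_pyRange_one.mp hi)) le_rfl ns nsep h
  omega

-- ===== PORT B =====
-- B's while-loop: state (start, i, sep); one step per character, no restart.
def ttLoopB (cs : List Char) (start i : Int) (sep : String) : Option (List Int) :=
  if h : i < (cs.length : Int) then
    match PySem.List.pyGet? cs i with
    | none => none
    | some c =>
      if String.ofList [c] = "\"" ∧ sep ≠ "\"" then ttLoopB cs (i + 1) (i + 1) "\""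
      else if String.ofList [c] = sep then
        if i = start then ttLoopB cs (i + 1) (i + 1) " "
        else some [start, i]
      else ttLoopB cs start (i + 1) sep
  else none
termination_by ((cs.length : Int) - i).toNat
decreasing_by all_goals omega

def TaskToken_alt (taskString : String) (startIndex : Int) (separator : String) : Option (List Int) :=
  ttLoopB taskString.toList startIndex startIndex separator

-- ===== PRECONDITION & SPEC =====
-- Pre_ excludes startIndex < -len(taskString): there both A and B raise IndexError on the
-- first (negative, out-of-range) index taskString[startIndex].
def Pre_TaskToken (taskString : String) (startIndex : Int) (separator : String) : Prop :=
  -(taskString.toList.length : Int) ≤ startIndex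
instance (taskString : String) (startIndex : Int) (separator : String) : Decidable (Pre_TaskToken taskString startIndex separator) := by unfold Pre_TaskToken; infer_instance
def pvWitness_TaskToken : String × Int × String := ("ab cd", 0, " ")

def Spec_TaskToken (taskString : String) (startIndex : Int) (separator : String) (out : Option (List Int)) : Prop := out = TaskToken_alt taskString startIndex separator
instance (taskString : String) (startIndex : Int) (separator : String) (out : Option (List Int)) : Decidable (Spec_TaskToken taskString startIndex separator out) := by unfold Spec_TaskToken; infer_instance

-- ===== CLAIM (what is proved, stated in full; the proofs are below) =====
def Claim_equal_TaskToken : Prop := ∀ (taskString : String) (startIndex : Int) (separator : String), Dom_TaskToken taskString startIndex separator → Pre_TaskToken taskString startIndex separator → Spec_TaskToken taskString startIndex separator (TaskToken taskString startIndex separator)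

-- ===== LEMMAS AND PROOFS =====

-- B's loop from index i computes exactly: run A's scan of range(i, len); on a recursive-call
-- signal (ns, nsep) continue as B's loop restarted at ns.
theorem loopB_eq_scanA (cs : List Char) (sep : String) (start i : Int) (hsi : start ≤ i) :
    ttLoopB cs start i sep =
      (match ttScanA cs start sep (PySem.List.pyRange i (cs.length : Int) 1) with
       | Sum.inl (ns, nsep) => ttLoopB cs ns ns nsep
       | Sum.inr r => r) := by
  by_cases hlt : i < (cs.length : Int)
  · rw [PySem.List.pyRange_one_cons hlt, ttLoopB, dif_pos hlt]
    cases hg : PySem.List.pyGet? cs i with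
    | none => simp only [ttScanA, hg]
    | some c =>
      simp only [ttScanA, hg]
      split_ifs with h1 h2 h3 h4
      · rfl
      · rfl
      · omega
      · omega
      · rfl
      · exact loopB_eq_scanA cs sep start (i + 1) (by omega)
  · rw [PySem.List.pyRange_one_eq_nil (by omega), ttLoopB, dif_neg hlt]
    simp [ttScanA]
termination_by ((cs.length : Int) - i).toNat
decreasing_by omega

theorem TaskToken_eq_alt (taskString : String) (startIndex : Int) (separator : String) :
    TaskToken taskString startIndex separator = TaskToken_alt taskString startIndex separator := by
  rw [TaskToken, TaskToken_alt]
  rw [loopB_eq_scanA taskString.toList separator startIndex startIndex le_rfl]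
  cases h : ttScanA taskString.toList startIndex separator
      (PySem.List.pyRange startIndex (taskString.toList.length : Int) 1) with
  | inl p =>
    obtain ⟨ns, nsep⟩ := p
    have := TaskToken_eq_alt taskString ns nsep
    rw [TaskToken_alt] at this
    simpa using this
  | inr r => simp
termination_by ((taskString.toList.length : Int) - startIndex).toNat
decreasing_by
  have hb := ttScanA_inl_bounds taskString.toList startIndex separator startIndex
      (taskString.toList.length : Int) _
      (fun i hi => (PySem.List.mem_pyRange_one.mp hi)) le_rfl ns nsep h
  omega

-- ===== VERDICT (by name: the statement is the Claim_ definition above) =====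
theorem TaskToken_spec : Claim_equal_TaskToken := by
  intro s st sep _ _
  exact TaskToken_eq_alt s st sep
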